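-- pv_equiv track=rewrite | github.com/Marcuswong0327/resume-extraction | excel_exporter.py | _count_programming_skills
-- ===== SOURCE A (Python) =====
-- from typing import List, Dict, Any
--
-- def _count_programming_skills(skills: List[str]) -> int:
--     """Count programming-related skills"""
--     programming_keywords = [
--         'python', 'java', 'javascript', 'c++', 'c#', 'php', 'ruby', 'go', 'rust',
--         'typescript', 'swift', 'kotlin', 'scala', 'r', 'matlab', 'sql', 'html', 'css'
--     ]
--
--     count = 0
--     for skill in skills:
--         if any(keyword in skill.lower() for keyword in programming_keywords):
--             count += 1
--
--     return count
-- ===== SOURCE B (Python) =====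
-- def _count_programming_skills(skills):
--     """Count programming-related skills (position-scan multi-pattern matcher)."""
--     programming_keywords = [
--         'python', 'java', 'javascript', 'c++', 'c#', 'php', 'ruby', 'go', 'rust',
--         'typescript', 'swift', 'kotlin', 'scala', 'r', 'matlab', 'sql', 'html', 'css'
--     ]
--     count = 0
--     for skill in skills:
--         s = skill.lower()
--         if any(any(s.startswith(k, i) for k in programming_keywords)
--                for i in range(len(s) + 1)):
--             count += 1
--     return count
-- ===== Notes on version B (the rewrite author's own statement) =====
-- stated objective: alternative
-- what changed: Instead of running an independent substring search over the whole lowered skill for each keyword, B lowers the skill once and scans it position by position, testing at each position whether any keyword starts there (a multi-pattern anchored scan).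
import Mathlib
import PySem

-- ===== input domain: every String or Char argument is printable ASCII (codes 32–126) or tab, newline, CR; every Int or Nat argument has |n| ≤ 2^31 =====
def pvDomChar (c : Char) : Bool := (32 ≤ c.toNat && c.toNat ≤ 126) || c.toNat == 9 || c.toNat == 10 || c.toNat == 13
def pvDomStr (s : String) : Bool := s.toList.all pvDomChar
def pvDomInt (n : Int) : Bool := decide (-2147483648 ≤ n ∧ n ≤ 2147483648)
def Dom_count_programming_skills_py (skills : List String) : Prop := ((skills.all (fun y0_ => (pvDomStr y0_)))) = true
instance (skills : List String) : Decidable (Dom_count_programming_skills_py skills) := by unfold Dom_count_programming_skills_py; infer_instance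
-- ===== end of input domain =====

-- B replaces A's per-keyword whole-string substring searches by a single left-to-right
-- position scan of the lowered skill, testing at each position whether some keyword
-- starts there (alternative decomposition, same cost class).

-- ===== PORT A =====
def pvKeywords : List String :=
  ["python", "java", "javascript", "c++", "c#", "php", "ruby", "go", "rust",
   "typescript", "swift", "kotlin", "scala", "r", "matlab", "sql", "html", "css"]

def count_programming_skills_py (skills : List String) : Int :=
  skills.foldl
    (fun count skill =>
      if pvKeywords.any (fun keyword => PySem.Str.isIn keyword (PySem.Str.lower skill))
      then count + 1 else count) 0

-- ===== PORT B =====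
-- s.startswith(k, i) is ported as startswith on the slice s[i:]; exact here since every
-- i drawn from range(len(s)+1) is nonnegative, where CPython defines s.startswith(k, i)
-- as k being a prefix of s[i:].
def count_programming_skills_py_alt (skills : List String) : Int :=
  skills.foldl
    (fun count skill =>
      let s := PySem.Str.lower skill
      if (PySem.List.pyRange 0 ((PySem.Str.len s : Int) + 1) 1).any (fun i =>
           pvKeywords.any (fun k => PySem.Str.startswith (PySem.Str.slice s (some i) none) k))
      then count + 1 else count) 0

-- ===== PRECONDITION & SPEC =====
def Spec_count_programming_skills_py (skills : List String) (out : Int) : Prop := out = count_programming_skills_py_alt skills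
instance (skills : List String) (out : Int) : Decidable (Spec_count_programming_skills_py skills out) := by unfold Spec_count_programming_skills_py; infer_instance

-- ===== CLAIM (what is proved, stated in full; the proofs are below) =====
def Claim_equal_count_programming_skills_py : Prop := ∀ (skills : List String), Dom_count_programming_skills_py skills → Spec_count_programming_skills_py skills (count_programming_skills_py skills)

-- ===== LEMMAS AND PROOFS =====

-- Per skill, A's "some keyword is a substring" test equals B's "some position where
-- some keyword starts" test.
lemma pv_cond_eq (skill : String) :
    (pvKeywords.any (fun keyword => PySem.Str.isIn keyword (PySem.Str.lower skill)))
    = ((PySem.List.pyRange 0 ((PySem.Str.len (PySem.Str.lower skill) : Int) + 1) 1).any (fun i =>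
         pvKeywords.any (fun k =>
           PySem.Str.startswith (PySem.Str.slice (PySem.Str.lower skill) (some i) none) k))) := by
  set s := PySem.Str.lower skill with hs
  set cs : List Char := s.toList with hcs
  rw [Bool.eq_iff_iff]
  simp only [List.any_eq_true]
  constructor
  · rintro ⟨k, hk, hin⟩
    have hin' : PySem.Chars.isIn k.toList cs = true := by
      simpa [PySem.Str.isIn] using hin
    obtain ⟨j, hj⟩ := (PySem.Chars.exists_prefix_drop_iff_isIn k.toList cs).2 hin'
    refine ⟨(min j cs.length : Nat), ?_, k, hk, ?_⟩
    · rw [PySem.List.mem_pyRange_one]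
      constructor
      · positivity
      · have : (min j cs.length : Int) ≤ (cs.length : Int) := by
          exact_mod_cast Int.ofNat_le.2 (Nat.min_le_right _ _)
        simp only [PySem.Str.len_eq, hcs]
        omega
    · have hdrop : cs.drop (min j cs.length) = cs.drop j := by
        by_cases h : j ≤ cs.length
        · rw [Nat.min_eq_left h]
        · rw [Nat.min_eq_right (by omega), List.drop_eq_nil_of_le (le_refl _),
              List.drop_eq_nil_of_le (by omega)]
      have : k.toList <+: PySem.List.slice cs (some ((min j cs.length : Nat) : Int)) none := by
        rw [PySem.List.slice_from_natCast, hdrop]; exact hj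
      simpa [PySem.Str.startswith, PySem.Str.slice, PySem.Chars.slice_eq_listSlice,
             PySem.Chars.startswith_iff] using this
  · rintro ⟨i, hi, k, hk, hsw⟩
    rw [PySem.List.mem_pyRange_one] at hi
    have hpre : k.toList <+: cs.drop i.toNat := by
      have := hsw
      simp only [PySem.Str.startswith, PySem.Str.slice, PySem.Chars.slice_eq_listSlice,
                 PySem.Chars.startswith_iff, String.toList_ofList] at this
      rwa [PySem.List.slice_from _ hi.1] at this
    refine ⟨k, hk, ?_⟩
    have : PySem.Chars.isIn k.toList cs = true :=
      (PySem.Chars.exists_prefix_drop_iff_isIn k.toList cs).1 ⟨i.toNat, hpre⟩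
    simpa [PySem.Str.isIn] using this

-- ===== VERDICT (by name: the statement is the Claim_ definition above) =====
set_option maxHeartbeats 1000000 in
theorem count_programming_skills_py_spec : Claim_equal_count_programming_skills_py := by
  intro skills _
  unfold Spec_count_programming_skills_py count_programming_skills_py count_programming_skills_py_alt
  suffices h : ∀ (l : List String) (c : Int),
      l.foldl (fun count skill =>
        if pvKeywords.any (fun keyword => PySem.Str.isIn keyword (PySem.Str.lower skill))
        then count + 1 else count) c
      = l.foldl (fun count skill =>
          let s := PySem.Str.lower skill
          if (PySem.List.pyRange 0 ((PySem.Str.len s : Int) + 1) 1).any (fun i =>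
               pvKeywords.any (fun k => PySem.Str.startswith (PySem.Str.slice s (some i) none) k))
          then count + 1 else count) c by
    exact h skills 0
  intro l
  induction l with
  | nil => intro c; rfl
  | cons x xs ih =>
    intro c
    simp only [List.foldl_cons, pv_cond_eq x]
    exact ih _
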